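-- pv_equiv track=rewrite | github.com/KMKHM/ProblemSolving | Baekjoon/implementation/2922.py | check_vowel
-- ===== SOURCE A (Python) =====
-- vowel = "AEIOU"
--
-- alpha = "BCDFGHJKLMNPQRSTVWXYZ"
--
-- def check_vowel(arr):
--     cnt1, cnt2 =0, 0
--     for c in arr:
--         if c in vowel:
--             cnt2=0
--             cnt1+=1
--             if cnt1 >= 3:
--                 return True
--         elif c in alpha:
--             cnt1=0
--             cnt2+=1
--             if cnt2 >= 3:
--                 return True
--         else:
--             cnt1=0
--             cnt2=0
--     return False
-- ===== SOURCE B (Python) =====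
-- vowel = "AEIOU"
--
-- alpha = "BCDFGHJKLMNPQRSTVWXYZ"
--
-- def check_vowel(arr):
--     cats = ''.join('V' if c in vowel else 'C' if c in alpha else 'O' for c in arr)
--     return 'VVV' in cats or 'CCC' in cats
-- ===== Notes on version B (the rewrite author's own statement) =====
-- stated objective: idiomatic
-- what changed: Replaces the explicit two-counter state machine with a classify-then-search decomposition: map each character to a category letter (vowel/consonant/other) and test the category string for a three-in-a-row substring of either letter.
import Mathlib
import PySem

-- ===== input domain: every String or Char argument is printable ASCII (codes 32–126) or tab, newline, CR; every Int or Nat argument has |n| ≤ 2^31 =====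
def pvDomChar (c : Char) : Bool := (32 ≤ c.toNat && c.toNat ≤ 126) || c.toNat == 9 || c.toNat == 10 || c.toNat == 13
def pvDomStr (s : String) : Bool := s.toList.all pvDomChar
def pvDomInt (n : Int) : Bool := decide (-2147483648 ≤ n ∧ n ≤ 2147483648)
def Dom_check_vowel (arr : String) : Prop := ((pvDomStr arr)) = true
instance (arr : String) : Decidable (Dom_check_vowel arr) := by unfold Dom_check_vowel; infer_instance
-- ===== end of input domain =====

-- B replaces A's two-counter state machine by classify-to-V/C/O then substring search (idiomatic, same cost).

-- module constants shared by both versions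
def pvVowel : List Char := "AEIOU".toList
def pvAlpha : List Char := "BCDFGHJKLMNPQRSTVWXYZ".toList

-- ===== PORT A =====
-- the loop of A: state (cnt1, cnt2), early return via Bool result
def check_vowel_go : List Char → Int → Int → Bool
  | [], _, _ => false
  | c :: rest, cnt1, cnt2 =>
    if pvVowel.contains c then
      if cnt1 + 1 ≥ 3 then true else check_vowel_go rest (cnt1 + 1) 0
    else if pvAlpha.contains c then
      if cnt2 + 1 ≥ 3 then true else check_vowel_go rest 0 (cnt2 + 1)
    else check_vowel_go rest 0 0

def check_vowel (arr : String) : Bool := check_vowel_go arr.toList 0 0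

-- ===== PORT B =====
-- 'V' if c in vowel else 'C' if c in alpha else 'O'
def pvClassify (c : Char) : Char :=
  if pvVowel.contains c then 'V' else if pvAlpha.contains c then 'C' else 'O'

-- Python's "xxx in s" substring test, hand-ported (exact for a 3-character pattern xxx)
def pvTriple (x : Char) : List Char → Bool
  | a :: b :: c :: r => (a == x && b == x && c == x) || pvTriple x (b :: c :: r)
  | _ => false

def check_vowel_alt (arr : String) : Bool :=
  let cats := arr.toList.map pvClassify
  pvTriple 'V' cats || pvTriple 'C' cats

-- ===== PRECONDITION & SPEC =====
def Spec_check_vowel (arr : String) (out : Bool) : Prop := out = check_vowel_alt arr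
instance (arr : String) (out : Bool) : Decidable (Spec_check_vowel arr out) := by unfold Spec_check_vowel; infer_instance

-- ===== CLAIM (what is proved, stated in full; the proofs are below) =====
def Claim_equal_check_vowel : Prop := ∀ (arr : String), Dom_check_vowel arr → Spec_check_vowel arr (check_vowel arr)

-- ===== LEMMAS AND PROOFS =====

-- a triple needs three characters
theorem pvTriple_short (x : Char) (l : List Char) (h : l.length < 3) : pvTriple x l = false := by
  match l, h with
  | [], _ => rfl
  | [a], _ => rfl
  | [a, b], _ => rfl

-- a leading character different from x cannot start a triple of x
theorem pvTriple_skip (x y : Char) (l : List Char) (h : y ≠ x) : pvTriple x (y :: l) = pvTriple x l := by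
  match l with
  | [] => rfl
  | [a] => rfl
  | a :: b :: r => simp [pvTriple, h]

-- a run of at most two x's broken by a different character contributes nothing
theorem pvTriple_break (x y : Char) (k : Nat) (hk : k ≤ 2) (h : y ≠ x) (l : List Char) :
    pvTriple x (List.replicate k x ++ y :: l) = pvTriple x l := by
  interval_cases k
  · exact pvTriple_skip x y l h
  · show pvTriple x (x :: y :: l) = pvTriple x l
    match l with
    | [] => rfl
    | a :: r =>
      rw [show pvTriple x (x :: y :: a :: r) = ((x == x && y == x && a == x) || pvTriple x (y :: a :: r)) from rfl]
      simp [h, pvTriple_skip x y (a :: r) h]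
  · show pvTriple x (x :: x :: y :: l) = pvTriple x l
    have h1 : ∀ m : List Char, pvTriple x (x :: y :: m) = pvTriple x m := by
      intro m
      match m with
      | [] => rfl
      | a :: r =>
        rw [show pvTriple x (x :: y :: a :: r) = ((x == x && y == x && a == x) || pvTriple x (y :: a :: r)) from rfl]
        simp [h, pvTriple_skip x y (a :: r) h]
    rw [show pvTriple x (x :: x :: y :: l) = ((x == x && x == x && y == x) || pvTriple x (x :: y :: l)) from rfl]
    simp [h, h1 l]

-- extending the run by one matching character
theorem replicate_append_cons (x : Char) (k : Nat) (l : List Char) :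
    List.replicate k x ++ x :: l = List.replicate (k + 1) x ++ l := by
  rw [List.replicate_succ' (n := k)]
  simp

-- three in a row is a triple
theorem pvTriple_full (x : Char) (l : List Char) :
    pvTriple x (List.replicate 3 x ++ l) = true := by
  rw [show List.replicate 3 x ++ l = x :: x :: x :: l from by simp [List.replicate]]
  rw [show pvTriple x (x :: x :: x :: l) = ((x == x && x == x && x == x) || pvTriple x (x :: x :: l)) from rfl]
  simp

-- the main loop invariant: the state machine equals the substring search on the
-- category string with the pending run prepended
theorem go_invariant (l : List Char) : ∀ (c1 c2 : Int),
    0 ≤ c1 → c1 ≤ 2 → 0 ≤ c2 → c2 ≤ 2 → (c1 = 0 ∨ c2 = 0) →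
    check_vowel_go l c1 c2 =
      (pvTriple 'V' (List.replicate c1.toNat 'V' ++ l.map pvClassify) ||
       pvTriple 'C' (List.replicate c2.toNat 'C' ++ l.map pvClassify)) := by
  induction l with
  | nil =>
    intro c1 c2 h1 h2 h3 h4 _
    have e1 : pvTriple 'V' (List.replicate c1.toNat 'V') = false := by
      apply pvTriple_short; simp; omega
    have e2 : pvTriple 'C' (List.replicate c2.toNat 'C') = false := by
      apply pvTriple_short; simp; omega
    simp [check_vowel_go, e1, e2]
  | cons c rest ih =>
    intro c1 c2 h1 h2 h3 h4 h5
    have hVC : ('C' : Char) ≠ 'V' := by decide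
    have hCV : ('V' : Char) ≠ 'C' := by decide
    have hOV : ('O' : Char) ≠ 'V' := by decide
    have hOC : ('O' : Char) ≠ 'C' := by decide
    by_cases hv : c ∈ pvVowel
    · -- vowel: category 'V'
      have hcls : pvClassify c = 'V' := by simp [pvClassify, hv]
      have hmap : (c :: rest).map pvClassify = 'V' :: rest.map pvClassify := by simp [hcls]
      by_cases hfull : c1 + 1 ≥ 3
      · have hc1 : c1 = 2 := by omega
        have hA : check_vowel_go (c :: rest) c1 c2 = true := by
          simp [check_vowel_go, hv, hfull]
        rw [hA, hmap, hc1]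
        rw [show List.replicate (Int.toNat 2) 'V' ++ 'V' :: rest.map pvClassify =
               List.replicate 3 'V' ++ rest.map pvClassify from replicate_append_cons 'V' 2 _]
        rw [pvTriple_full]
        simp
      · have step : check_vowel_go (c :: rest) c1 c2 = check_vowel_go rest (c1 + 1) 0 := by
          simp [check_vowel_go, hv]
          omega
        rw [step, ih (c1 + 1) 0 (by omega) (by omega) (by omega) (by omega) (Or.inr rfl), hmap]
        congr 1
        · congr 1
          rw [replicate_append_cons]
          congr 2
          omega
        · rw [pvTriple_break 'C' 'V' c2.toNat (by omega) hCV]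
          simp
    · by_cases ha : c ∈ pvAlpha
      · -- consonant: category 'C'
        have hcls : pvClassify c = 'C' := by simp [pvClassify, hv, ha]
        have hmap : (c :: rest).map pvClassify = 'C' :: rest.map pvClassify := by simp [hcls]
        by_cases hfull : c2 + 1 ≥ 3
        · have hc2 : c2 = 2 := by omega
          have hA : check_vowel_go (c :: rest) c1 c2 = true := by
            simp [check_vowel_go, hv, ha, hfull]
          rw [hA, hmap, hc2]
          rw [show List.replicate (Int.toNat 2) 'C' ++ 'C' :: rest.map pvClassify =
                 List.replicate 3 'C' ++ rest.map pvClassify from replicate_append_cons 'C' 2 _]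
          rw [pvTriple_full]
          simp
        · have step : check_vowel_go (c :: rest) c1 c2 = check_vowel_go rest 0 (c2 + 1) := by
            simp [check_vowel_go, hv, ha]
            omega
          rw [step, ih 0 (c2 + 1) (by omega) (by omega) (by omega) (by omega) (Or.inl rfl), hmap]
          congr 1
          · rw [pvTriple_break 'V' 'C' c1.toNat (by omega) hVC]
            simp
          · congr 1
            rw [replicate_append_cons]
            congr 2
            omega
      · -- other: category 'O'
        have hcls : pvClassify c = 'O' := by simp [pvClassify, hv, ha]
        have hmap : (c :: rest).map pvClassify = 'O' :: rest.map pvClassify := by simp [hcls]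
        have step : check_vowel_go (c :: rest) c1 c2 = check_vowel_go rest 0 0 := by
          simp [check_vowel_go, hv, ha]
        rw [step, ih 0 0 (by omega) (by omega) (by omega) (by omega) (Or.inl rfl), hmap]
        congr 1
        · rw [pvTriple_break 'V' 'O' c1.toNat (by omega) hOV]
          simp
        · rw [pvTriple_break 'C' 'O' c2.toNat (by omega) hOC]
          simp

-- ===== VERDICT (by name: the statement is the Claim_ definition above) =====
theorem check_vowel_spec : Claim_equal_check_vowel := by
  intro arr _
  unfold Spec_check_vowel check_vowel check_vowel_alt
  rw [go_invariant arr.toList 0 0 (by omega) (by omega) (by omega) (by omega) (Or.inl rfl)]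
  simp
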